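-- pv_equiv track=rewrite | github.com/geunsu12/python-problem-solving | BJ/9527.py | sum_one
-- ===== SOURCE A (Python) =====
-- import math
--
-- def sum_one(target_num):
--     if target_num <= 0:
--         return 0
--
--     n = int(math.log2(target_num))
--     tmp_num = 2**n
--
--     if target_num == tmp_num:
--         return int(n*(2**n)/2)+1
--
--     diff = target_num-tmp_num
--
--     return sum_one(tmp_num)+diff+sum_one(diff)
-- ===== SOURCE B (Python) =====
-- def sum_one(target_num):
--     total = 0
--     rest = target_num if target_num > 0 else 0
--     while rest > 0:
--         p = rest.bit_length() - 1
--         rest -= 1 << p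
--         total += p * (1 << p) // 2 + 1 + rest
--     return total
-- ===== Notes on version B (the rewrite author's own statement) =====
-- stated objective: simpler
-- what changed: Replaced A's double recursion (on the top power of two and on the remainder) with a single iterative loop over the set bits keeping a running total, and replaced math.log2/float division with exact integer bit_length and // arithmetic.
import Mathlib
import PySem

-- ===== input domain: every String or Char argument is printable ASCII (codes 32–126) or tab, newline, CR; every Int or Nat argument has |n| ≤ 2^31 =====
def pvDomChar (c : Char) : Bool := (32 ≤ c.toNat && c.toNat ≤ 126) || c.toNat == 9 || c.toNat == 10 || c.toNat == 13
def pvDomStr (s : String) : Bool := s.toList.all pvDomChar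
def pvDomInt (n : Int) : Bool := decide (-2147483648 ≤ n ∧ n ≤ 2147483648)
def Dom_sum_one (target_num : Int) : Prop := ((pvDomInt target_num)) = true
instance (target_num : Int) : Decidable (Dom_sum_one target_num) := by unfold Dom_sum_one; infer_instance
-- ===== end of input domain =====

-- B replaces A's recursion by a single loop over the set bits with a running total,
-- using exact integer arithmetic (bit_length, //) instead of math.log2 and float
-- division (both are exact on the domain |n| ≤ 2^31); objective: simpler.

-- ===== PORT A =====
-- int(math.log2 t) is exact for 0 < t ≤ 2^31, ported as Nat.log 2 t.toNat;
-- int(n*(2**n)/2) is exact for n ≤ 31 (n*2^n < 2^53), ported as integer division.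
def sum_one (target_num : Int) : Int :=
  if target_num ≤ 0 then 0
  else
    let n := Nat.log 2 target_num.toNat
    let tmp : Int := 2 ^ n
    if target_num = tmp then ((n : Int) * 2 ^ n) / 2 + 1
    else
      let diff := target_num - tmp
      sum_one tmp + diff + sum_one diff
termination_by target_num.toNat
decreasing_by
  · rename_i hne
    simp only [tmp, n] at hne
    have hL : ((2 : Int) ^ Nat.log 2 target_num.toNat)
        = ((2 ^ Nat.log 2 target_num.toNat : Nat) : Int) := by push_cast; ring
    have h1 : 2 ^ Nat.log 2 target_num.toNat ≤ target_num.toNat :=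
      Nat.pow_log_le_self 2 (by omega)
    rw [hL] at hne ⊢
    omega
  · have hL : ((2 : Int) ^ Nat.log 2 target_num.toNat)
        = ((2 ^ Nat.log 2 target_num.toNat : Nat) : Int) := by push_cast; ring
    have hpos : 0 < 2 ^ Nat.log 2 target_num.toNat := Nat.pow_pos (by omega)
    rw [hL]
    omega

-- ===== PORT B =====
def sum_one_alt_go (rest : Nat) (total : Int) : Int :=
  if rest = 0 then total
  else
    let p := Nat.log2 rest
    let rest' := rest - 2 ^ p
    sum_one_alt_go rest' (total + ((p : Int) * 2 ^ p) / 2 + 1 + (rest' : Int))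
termination_by rest
decreasing_by
  exact Nat.sub_lt (by omega) (Nat.pow_pos (by omega))

def sum_one_alt (target_num : Int) : Int :=
  sum_one_alt_go target_num.toNat 0

-- ===== PRECONDITION & SPEC =====
def Spec_sum_one (target_num : Int) (out : Int) : Prop := out = sum_one_alt target_num
instance (target_num : Int) (out : Int) : Decidable (Spec_sum_one target_num out) := by unfold Spec_sum_one; infer_instance

-- ===== CLAIM (what is proved, stated in full; the proofs are below) =====
def Claim_equal_sum_one : Prop := ∀ (target_num : Int), Dom_sum_one target_num → Spec_sum_one target_num (sum_one target_num)

-- ===== LEMMAS AND PROOFS =====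

theorem sum_one_nonpos (t : Int) (h : t ≤ 0) : sum_one t = 0 := by
  rw [sum_one, if_pos h]

theorem sum_one_pow (n : Nat) : sum_one ((2 : Int) ^ n) = ((n : Int) * 2 ^ n) / 2 + 1 := by
  rw [sum_one]
  have hp : (0 : Int) < 2 ^ n := by positivity
  rw [if_neg (by omega)]
  have ht : ((2 : Int) ^ n).toNat = 2 ^ n := by
    rw [show ((2 : Int) ^ n) = ((2 ^ n : Nat) : Int) by push_cast; ring, Int.toNat_natCast]
  simp only [ht, Nat.log_pow (by omega : 1 < 2)]
  simp

-- the loop of B accumulates exactly A's recursion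
theorem alt_go_eq (rest : Nat) (total : Int) :
    sum_one_alt_go rest total = total + sum_one (rest : Int) := by
  induction rest using Nat.strong_induction_on generalizing total with
  | _ rest ih =>
    rw [sum_one_alt_go]
    by_cases h0 : rest = 0
    · simp [h0, sum_one_nonpos 0 le_rfl]
    · rw [if_neg h0]
      have hrpos : 0 < rest := Nat.pos_of_ne_zero h0
      set p := Nat.log2 rest with hp
      have hple : 2 ^ p ≤ rest := by
        rw [hp, Nat.log2_eq_log_two]; exact Nat.pow_log_le_self 2 h0
      have hdec : rest - 2 ^ p < rest := Nat.sub_lt hrpos (Nat.pow_pos (by omega))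
      rw [ih _ hdec]
      have hlog : Nat.log 2 rest = p := by rw [hp, Nat.log2_eq_log_two]
      have hcast : ((rest - 2 ^ p : Nat) : Int) = (rest : Int) - 2 ^ p := by
        push_cast [hple]; ring
      conv_rhs => rw [sum_one]
      rw [if_neg (by omega : ¬ ((rest : Int) ≤ 0))]
      simp only [Int.toNat_natCast, hlog]
      by_cases heq : (rest : Int) = 2 ^ p
      · have h2 : rest = 2 ^ p := by exact_mod_cast heq
        rw [if_pos heq]
        have : rest - 2 ^ p = 0 := by omega
        rw [this]
        simp [sum_one_nonpos 0 le_rfl]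
        ring
      · rw [if_neg heq, sum_one_pow, hcast]
        ring

-- ===== VERDICT (by name: the statement is the Claim_ definition above) =====
theorem sum_one_spec : Claim_equal_sum_one := by
  intro t _
  unfold Spec_sum_one sum_one_alt
  rw [alt_go_eq]
  by_cases h : t ≤ 0
  · have h0 : t.toNat = 0 := by omega
    rw [h0, sum_one_nonpos t h]
    simp [sum_one_nonpos 0 le_rfl]
  · have h1 : ((t.toNat : Int)) = t := by omega
    rw [h1]; ring
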